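-- pv_equiv track=rewrite | github.com/RAIK283H/pathfinding-code-adammessman | permutation.py | find_largest_mobile
-- ===== SOURCE A (Python) =====
-- def find_largest_mobile(nodes):
--     largest_mobile_index = 0
--     largest_mobile_number = 0
--
--     # Loops through to check if others are higher mobile
--     for i in range(1, len(nodes) - 1):
--         # Case if negative number
--         if(nodes[i] < 0):
--             if (abs(nodes[i]) > abs(largest_mobile_number)) and (abs(nodes[i]) > abs(nodes[i - 1])):
--                 largest_mobile_index = i
--                 largest_mobile_number = nodes[i]
--         # Case if positive number
--         else:
--             if (nodes[i] > abs(largest_mobile_number)) and (nodes[i] > abs(nodes[i + 1])):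
--                 largest_mobile_index = i
--                 largest_mobile_number = nodes[i]
--
--     # Checks to see if last in list points left and is greater than current largest mobile
--     if (nodes[len(nodes) - 1] < 0) and (abs(nodes[len(nodes) - 1]) > abs(nodes[len(nodes) - 2])) and (abs(nodes[len(nodes) - 1]) > abs(largest_mobile_number)):
--         largest_mobile_index = len(nodes) - 1
--         largest_mobile_number = nodes[len(nodes) - 1]
--
--     # Sets the largest to -1 if the first index in list is wrong
--     if (largest_mobile_number == 0) and ((nodes[0] < 0) or (abs(nodes[0]) < abs(nodes[1]))):
--         largest_mobile_index = -1
--     return largest_mobile_index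
-- ===== SOURCE B (Python) =====
-- def find_largest_mobile(nodes):
--     n = len(nodes)
--     # collect every mobile index, then take the first index of largest magnitude
--     candidates = [i for i in range(1, n - 1)
--                   if (abs(nodes[i]) > abs(nodes[i - 1]) if nodes[i] < 0
--                       else nodes[i] > abs(nodes[i + 1]))]
--     if nodes[n - 1] < 0 and abs(nodes[n - 1]) > abs(nodes[n - 2]):
--         candidates.append(n - 1)
--     if candidates:
--         return max(candidates, key=lambda i: abs(nodes[i]))
--     return -1 if nodes[0] < 0 or abs(nodes[0]) < abs(nodes[1]) else 0
-- ===== Notes on version B (the rewrite author's own statement) =====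
-- stated objective: alternative
-- what changed: A's single running-max state machine (index,value pair updated under a combined mobility-and-beats-current test, plus a stateful last-index check and a fallback rewrite of the index) is replaced by collecting all mobile candidate indices in one comprehension (plus the last index when it points left and beats its neighbour) and then taking the first index of maximal absolute value with max(key=abs), falling back only when no candidate exists.
import Mathlib
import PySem

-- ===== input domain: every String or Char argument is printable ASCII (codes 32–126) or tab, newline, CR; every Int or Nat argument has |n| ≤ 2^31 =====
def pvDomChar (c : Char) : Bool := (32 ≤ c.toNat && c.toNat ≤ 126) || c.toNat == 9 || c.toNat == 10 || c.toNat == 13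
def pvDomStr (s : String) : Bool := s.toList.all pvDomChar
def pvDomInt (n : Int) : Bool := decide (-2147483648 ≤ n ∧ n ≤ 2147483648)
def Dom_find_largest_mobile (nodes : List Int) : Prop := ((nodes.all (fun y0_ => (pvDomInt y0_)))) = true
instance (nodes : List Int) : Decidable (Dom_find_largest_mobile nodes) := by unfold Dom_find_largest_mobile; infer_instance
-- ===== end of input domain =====

-- B replaces A's running-max state machine by collect-candidates-then-first-argmax (objective: alternative decomposition, same cost).

-- ===== PORT A =====
-- literal transliteration of A: running (index, number) maximum over the middle loop,
-- then the last-index check, then the fallback rewrite of the index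
def find_largest_mobile (nodes : List Int) : Int :=
  let st := (PySem.List.pyRange 1 ((nodes.length : Int) - 1) 1).foldl
    (fun (s : Int × Int) i =>
      if PySem.List.pyGetD nodes i 0 < 0 then
        if |PySem.List.pyGetD nodes i 0| > |s.2| ∧
           |PySem.List.pyGetD nodes i 0| > |PySem.List.pyGetD nodes (i - 1) 0| then
          (i, PySem.List.pyGetD nodes i 0)
        else s
      else
        if PySem.List.pyGetD nodes i 0 > |s.2| ∧
           PySem.List.pyGetD nodes i 0 > |PySem.List.pyGetD nodes (i + 1) 0| then
          (i, PySem.List.pyGetD nodes i 0)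
        else s)
    ((0 : Int), (0 : Int))
  let st :=
    if PySem.List.pyGetD nodes ((nodes.length : Int) - 1) 0 < 0 ∧
       |PySem.List.pyGetD nodes ((nodes.length : Int) - 1) 0| >
         |PySem.List.pyGetD nodes ((nodes.length : Int) - 2) 0| ∧
       |PySem.List.pyGetD nodes ((nodes.length : Int) - 1) 0| > |st.2| then
      ((nodes.length : Int) - 1, PySem.List.pyGetD nodes ((nodes.length : Int) - 1) 0)
    else st
  if st.2 = 0 ∧ (PySem.List.pyGetD nodes 0 0 < 0 ∨
                 |PySem.List.pyGetD nodes 0 0| < |PySem.List.pyGetD nodes 1 0|) then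
    -1
  else st.1

-- ===== PORT B =====
-- the signed mobility test of Source B's comprehension
def mobileB (nodes : List Int) (i : Int) : Bool :=
  if PySem.List.pyGetD nodes i 0 < 0 then
    decide (|PySem.List.pyGetD nodes i 0| > |PySem.List.pyGetD nodes (i - 1) 0|)
  else
    decide (PySem.List.pyGetD nodes i 0 > |PySem.List.pyGetD nodes (i + 1) 0|)

def find_largest_mobile_alt (nodes : List Int) : Int :=
  let n : Int := nodes.length
  let candidates := (PySem.List.pyRange 1 (n - 1) 1).filter (mobileB nodes)
  let candidates := candidates ++
    (if PySem.List.pyGetD nodes (n - 1) 0 < 0 ∧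
        |PySem.List.pyGetD nodes (n - 1) 0| > |PySem.List.pyGetD nodes (n - 2) 0| then
       [n - 1]
     else [])
  match PySem.List.max? candidates (fun i => |PySem.List.pyGetD nodes i 0|) with
  | some m => m
  | none =>
      if PySem.List.pyGetD nodes 0 0 < 0 ∨
         |PySem.List.pyGetD nodes 0 0| < |PySem.List.pyGetD nodes 1 0| then -1
      else 0

-- ===== PRECONDITION & SPEC =====
-- Pre_ excludes exactly the inputs where the Python A raises IndexError: the empty list,
-- and single-element lists whose element is ≥ 0 (the fallback then reads nodes[1]).
def Pre_find_largest_mobile (nodes : List Int) : Prop :=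
  2 ≤ nodes.length ∨ (nodes.length = 1 ∧ nodes.getD 0 0 < 0)
instance (nodes : List Int) : Decidable (Pre_find_largest_mobile nodes) := by
  unfold Pre_find_largest_mobile; infer_instance

def pvWitness_find_largest_mobile : List Int := [3, 1, 2]

def Spec_find_largest_mobile (nodes : List Int) (out : Int) : Prop :=
  out = find_largest_mobile_alt nodes
instance (nodes : List Int) (out : Int) : Decidable (Spec_find_largest_mobile nodes out) := by
  unfold Spec_find_largest_mobile; infer_instance

-- ===== CLAIM (what is proved, stated in full; the proofs are below) =====
def Claim_equal_find_largest_mobile : Prop :=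
  ∀ (nodes : List Int), Dom_find_largest_mobile nodes → Pre_find_largest_mobile nodes →
    Spec_find_largest_mobile nodes (find_largest_mobile nodes)

-- ===== LEMMAS AND PROOFS =====

-- the fold step behind PySem.List.max? (first argmax), and A's running-max step on candidates
def maxStep (v : Int → Int) : Option Int → Int → Option Int := fun acc x =>
  match acc with
  | none => some x
  | some m => if |v m| < |v x| then some x else some m

def gStep (v : Int → Int) : Int × Int → Int → Int × Int := fun s i =>
  if |v i| > |s.2| then (i, v i) else s

-- A's loop step, rewritten: update exactly when the mobility test holds and the magnitude beats the running one
theorem astep_eq (nodes : List Int) (s : Int × Int) (i : Int) :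
    (if PySem.List.pyGetD nodes i 0 < 0 then
        if |PySem.List.pyGetD nodes i 0| > |s.2| ∧
           |PySem.List.pyGetD nodes i 0| > |PySem.List.pyGetD nodes (i - 1) 0| then
          (i, PySem.List.pyGetD nodes i 0)
        else s
      else
        if PySem.List.pyGetD nodes i 0 > |s.2| ∧
           PySem.List.pyGetD nodes i 0 > |PySem.List.pyGetD nodes (i + 1) 0| then
          (i, PySem.List.pyGetD nodes i 0)
        else s) =
    (if mobileB nodes i then gStep (fun j => PySem.List.pyGetD nodes j 0) s i else s) := by
  simp only [mobileB, gStep]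
  by_cases h : PySem.List.pyGetD nodes i 0 < 0
  · simp only [if_pos h, decide_eq_true_eq]
    split_ifs <;> tauto
  · have habs : |PySem.List.pyGetD nodes i 0| = PySem.List.pyGetD nodes i 0 :=
      abs_of_nonneg (by omega)
    simp only [if_neg h, decide_eq_true_eq, habs]
    split_ifs <;> tauto

-- a mobile index has a value of positive magnitude
theorem mobileB_pos (nodes : List Int) (i : Int) (h : mobileB nodes i = true) :
    0 < |PySem.List.pyGetD nodes i 0| := by
  unfold mobileB at h
  split_ifs at h <;> simp only [decide_eq_true_eq] at h
  · have := abs_nonneg (PySem.List.pyGetD nodes (i - 1) 0); omega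
  · have := abs_nonneg (PySem.List.pyGetD nodes (i + 1) 0)
    have h2 : 0 ≤ PySem.List.pyGetD nodes i 0 := by omega
    rw [abs_of_nonneg h2]; omega

-- once the max-fold has an element it never loses it
theorem maxStep_some (v : Int → Int) (C : List Int) (x : Int) :
    C.foldl (maxStep v) (some x) ≠ none := by
  induction C generalizing x with
  | nil => simp
  | cons a C ih =>
    simp only [List.foldl_cons, maxStep]
    split_ifs <;> apply ih

-- the running first-argmax fold of A agrees with the first-argmax fold behind max?
theorem core (v : Int → Int) (C : List Int) (hC : ∀ i ∈ C, 0 < |v i|) (s : Int × Int)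
    (o : Option Int) (h : (o = none ∧ s.2 = 0) ∨ (∃ m, o = some m ∧ s = (m, v m))) :
    (C.foldl (maxStep v) o = none ∧ C.foldl (gStep v) s = s) ∨
    (∃ m, C.foldl (maxStep v) o = some m ∧ C.foldl (gStep v) s = (m, v m)) := by
  induction C generalizing s o with
  | nil =>
    simp only [List.foldl_nil]
    rcases h with ⟨ho, _⟩ | ⟨m, ho, hs⟩
    · simp [ho]
    · exact Or.inr ⟨m, ho, hs⟩
  | cons a C ih =>
    have ha : 0 < |v a| := hC a (List.mem_cons_self ..)
    have hC' : ∀ i ∈ C, 0 < |v i| := fun i hi => hC i (List.mem_cons_of_mem _ hi)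
    simp only [List.foldl_cons]
    rcases h with ⟨ho, hs⟩ | ⟨m, ho, hs⟩
    · subst ho
      have e1 : gStep v s a = (a, v a) := by
        simp only [gStep]; rw [if_pos]; rw [hs, abs_zero]; exact ha
      have e2 : maxStep v none a = some a := rfl
      rw [e1, e2]
      rcases ih hC' _ _ (Or.inr ⟨a, rfl, rfl⟩) with ⟨hn, _⟩ | hr
      · exact absurd hn (maxStep_some v C a)
      · exact Or.inr hr
    · subst ho; subst hs
      by_cases hlt : |v m| < |v a|
      · have e1 : gStep v (m, v m) a = (a, v a) := by
          simp only [gStep]; rw [if_pos hlt]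
        have e2 : maxStep v (some m) a = some a := by
          simp only [maxStep]; rw [if_pos hlt]
        rw [e1, e2]
        rcases ih hC' _ _ (Or.inr ⟨a, rfl, rfl⟩) with ⟨hn, _⟩ | hr
        · exact absurd hn (maxStep_some v C a)
        · exact Or.inr hr
      · have e1 : gStep v (m, v m) a = (m, v m) := by
          simp only [gStep]; rw [if_neg hlt]
        have e2 : maxStep v (some m) a = some m := by
          simp only [maxStep]; rw [if_neg hlt]
        rw [e1, e2]
        rcases ih hC' _ _ (Or.inr ⟨m, rfl, rfl⟩) with ⟨hn, _⟩ | hr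
        · exact absurd hn (maxStep_some v C m)
        · exact Or.inr hr

-- PySem.List.max? with an absolute-value key is the maxStep fold
theorem max?_eq_foldl (v : Int → Int) (C : List Int) :
    PySem.List.max? C (fun i => |v i|) = C.foldl (maxStep v) none := by
  unfold PySem.List.max?
  apply PySem.List.foldl_congr_mem
  intro acc x _
  cases acc <;> rfl

-- the final stage: A's running-max result against max? over the same candidate list
theorem final_eq (nodes : List Int) (C : List Int)
    (hC : ∀ i ∈ C, 0 < |PySem.List.pyGetD nodes i 0|) :
    (if (C.foldl (gStep (fun j => PySem.List.pyGetD nodes j 0)) (0, 0)).2 = 0 ∧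
        (PySem.List.pyGetD nodes 0 0 < 0 ∨
         |PySem.List.pyGetD nodes 0 0| < |PySem.List.pyGetD nodes 1 0|) then -1
     else (C.foldl (gStep (fun j => PySem.List.pyGetD nodes j 0)) (0, 0)).1) =
    (match PySem.List.max? C (fun i => |PySem.List.pyGetD nodes i 0|) with
     | some m => m
     | none =>
         if PySem.List.pyGetD nodes 0 0 < 0 ∨
            |PySem.List.pyGetD nodes 0 0| < |PySem.List.pyGetD nodes 1 0| then -1
         else 0) := by
  rcases core (fun j => PySem.List.pyGetD nodes j 0) C hC (0, 0) none (Or.inl ⟨rfl, rfl⟩) with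
    ⟨hn, hg⟩ | ⟨m, hm, hg⟩
  · have hmax : PySem.List.max? C (fun i => |PySem.List.pyGetD nodes i 0|) = none := by
      rw [max?_eq_foldl]; exact hn
    rw [hmax, hg]
    simp
  · have hmax : PySem.List.max? C (fun i => |PySem.List.pyGetD nodes i 0|) = some m := by
      rw [max?_eq_foldl]; exact hm
    have hmem : m ∈ C := PySem.List.max?_mem hmax
    have hne : PySem.List.pyGetD nodes m 0 ≠ 0 := by
      have := hC m hmem
      intro h0; rw [h0, abs_zero] at this; omega
    rw [hmax, hg]
    simp [hne]

-- ===== VERDICT (by name: the statement is the Claim_ definition above) =====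
theorem find_largest_mobile_spec : Claim_equal_find_largest_mobile := by
  intro nodes _ _
  unfold Spec_find_largest_mobile find_largest_mobile find_largest_mobile_alt
  have hfun : (fun (s : Int × Int) (i : Int) =>
      if PySem.List.pyGetD nodes i 0 < 0 then
        if |PySem.List.pyGetD nodes i 0| > |s.2| ∧
           |PySem.List.pyGetD nodes i 0| > |PySem.List.pyGetD nodes (i - 1) 0| then
          (i, PySem.List.pyGetD nodes i 0)
        else s
      else
        if PySem.List.pyGetD nodes i 0 > |s.2| ∧
           PySem.List.pyGetD nodes i 0 > |PySem.List.pyGetD nodes (i + 1) 0| then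
          (i, PySem.List.pyGetD nodes i 0)
        else s) =
      fun s i => if mobileB nodes i then gStep (fun j => PySem.List.pyGetD nodes j 0) s i
                 else s := by
    funext s i; exact astep_eq nodes s i
  rw [hfun, PySem.List.foldl_if_eq_foldl_filter]
  have hCmid : ∀ i ∈ (PySem.List.pyRange 1 ((nodes.length : Int) - 1) 1).filter (mobileB nodes),
      0 < |PySem.List.pyGetD nodes i 0| :=
    fun i hi => mobileB_pos nodes i (List.of_mem_filter hi)
  by_cases hc1 : PySem.List.pyGetD nodes ((nodes.length : Int) - 1) 0 < 0
  · by_cases hc2 : |PySem.List.pyGetD nodes ((nodes.length : Int) - 1) 0| >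
        |PySem.List.pyGetD nodes ((nodes.length : Int) - 2) 0|
    · -- last element is appended as a candidate
      have hC : ∀ i ∈ (PySem.List.pyRange 1 ((nodes.length : Int) - 1) 1).filter (mobileB nodes)
            ++ [(nodes.length : Int) - 1], 0 < |PySem.List.pyGetD nodes i 0| := by
        intro i hi
        rcases List.mem_append.1 hi with h | h
        · exact hCmid i h
        · have : i = (nodes.length : Int) - 1 := by simpa using h
          subst this
          exact abs_pos.2 (by omega)
      have hfin := final_eq nodes
        ((PySem.List.pyRange 1 ((nodes.length : Int) - 1) 1).filter (mobileB nodes)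
          ++ [(nodes.length : Int) - 1]) hC
      rw [List.foldl_append, List.foldl_cons, List.foldl_nil] at hfin
      simp only [hc1, hc2, if_pos, true_and, gt_iff_lt] at hfin ⊢
      simp only [gStep, gt_iff_lt] at hfin
      exact hfin
    · -- last element is not a candidate
      have hfin := final_eq nodes
        ((PySem.List.pyRange 1 ((nodes.length : Int) - 1) 1).filter (mobileB nodes)) hCmid
      simp only [hc2, false_and, and_false, if_false, gt_iff_lt] at hfin ⊢
      rw [List.append_nil]
      exact hfin
  · have hfin := final_eq nodes
      ((PySem.List.pyRange 1 ((nodes.length : Int) - 1) 1).filter (mobileB nodes)) hCmid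
    simp only [hc1, false_and, if_false] at hfin ⊢
    rw [List.append_nil]
    exact hfin
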